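-- pv_equiv track=rewrite | github.com/szmuschi/Python | Lab2/src/5.py | song
-- ===== SOURCE A (Python) =====
-- def song(notes, numbers, start):
--     n = len(notes)
--     ind = start
--     result = []
--     result.append(notes[ind % n])
--     for el in numbers:
--         ind = ind + el
--         result.append(notes[ind % n])
--     return result
-- ===== SOURCE B (Python) =====
-- def song(notes, numbers, start):
--     # Maintain a rotation of the notes list so the current note is always at the front:
--     # no integer position accumulator; each step rotates the list by el mod n.
--     n = len(notes)
--     k = start % n
--     cur = notes[k:] + notes[:k]
--     result = [cur[0]]
--     for el in numbers:
--         k = el % n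
--         cur = cur[k:] + cur[:k]
--         result.append(cur[0])
--     return result
-- ===== Notes on version B (the rewrite author's own statement) =====
-- stated objective: alternative
-- what changed: B replaces A's running integer index with a different data structure: it keeps the notes list itself rotated so the current note is always at the front, rotating it by el mod n each step; there is no position accumulator and no modular lookup in the loop.
import Mathlib
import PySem

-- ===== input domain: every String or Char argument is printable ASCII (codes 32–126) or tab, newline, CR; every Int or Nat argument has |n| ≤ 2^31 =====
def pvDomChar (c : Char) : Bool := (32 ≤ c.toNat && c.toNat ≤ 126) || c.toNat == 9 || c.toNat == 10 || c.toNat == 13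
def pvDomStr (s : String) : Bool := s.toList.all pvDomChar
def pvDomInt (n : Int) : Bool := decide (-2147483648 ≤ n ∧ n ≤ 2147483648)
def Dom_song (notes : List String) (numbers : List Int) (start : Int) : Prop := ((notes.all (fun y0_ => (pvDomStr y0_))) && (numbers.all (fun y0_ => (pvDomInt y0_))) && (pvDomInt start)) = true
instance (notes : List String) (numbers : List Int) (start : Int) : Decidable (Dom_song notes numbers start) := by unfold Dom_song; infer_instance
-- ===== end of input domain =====

-- B drops A's running integer index entirely: it maintains a ROTATION of the notes list
-- (cur = notes rotated so the current note is at the front) and rotates it by el mod n each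
-- step (objective: alternative — a different data structure, not a prefix-sum accumulator).

-- ===== PORT A =====
-- note lookup notes[i % n] (in range whenever notes ≠ [], since Python % is floor-mod)
def songNote (notes : List String) (i : Int) : String :=
  (PySem.List.pyGet? notes (PySem.Int.mod i (notes.length : Int))).getD ""

def songLoop (notes : List String) (numbers : List Int) (ind : Int) (result : List String) : List String :=
  match numbers with
  | [] => result
  | el :: rest => songLoop notes rest (ind + el) (result ++ [songNote notes (ind + el)])

def song (notes : List String) (numbers : List Int) (start : Int) : List String :=
  songLoop notes numbers start [songNote notes start]

-- ===== PORT B =====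
-- cur[k:] + cur[:k]  of Source B (k = el % n, nonnegative)
def songRot (cur : List String) (k : Int) : List String :=
  PySem.List.slice cur (some k) none ++ PySem.List.slice cur none (some k)

-- cur[0] of Source B
def songHead (cur : List String) : String :=
  (PySem.List.pyGet? cur 0).getD ""

def song_alt (notes : List String) (numbers : List Int) (start : Int) : List String :=
  let n : Int := notes.length
  let cur0 := songRot notes (PySem.Int.mod start n)
  (numbers.foldl
      (fun (st : List String × List String) el =>
        let cur := songRot st.1 (PySem.Int.mod el n)
        (cur, st.2 ++ [songHead cur]))
      (cur0, [songHead cur0])).2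

-- ===== PRECONDITION & SPEC =====
-- Pre_ excludes notes = [], on which both Pythons raise ZeroDivisionError (… % 0).
def Pre_song (notes : List String) (numbers : List Int) (start : Int) : Prop := notes ≠ []
instance (notes : List String) (numbers : List Int) (start : Int) : Decidable (Pre_song notes numbers start) := by unfold Pre_song; infer_instance
def pvWitness_song : List String × List Int × Int := (["do", "re", "mi"], [1, 2, -4], 0)

def Spec_song (notes : List String) (numbers : List Int) (start : Int) (out : List String) : Prop := out = song_alt notes numbers start
instance (notes : List String) (numbers : List Int) (start : Int) (out : List String) : Decidable (Spec_song notes numbers start out) := by unfold Spec_song; infer_instance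

-- ===== CLAIM (what is proved, stated in full; the proofs are below) =====
def Claim_equal_song : Prop := ∀ (notes : List String) (numbers : List Int) (start : Int), Dom_song notes numbers start → Pre_song notes numbers start → Spec_song notes numbers start (song notes numbers start)

-- ===== LEMMAS AND PROOFS =====

-- A's loop appends exactly the notes of the successive prefix sums
lemma songLoop_eq (notes : List String) (numbers : List Int) (ind : Int) (result : List String) :
    songLoop notes numbers ind result
      = result ++ ((List.scanl (· + ·) ind numbers).tail).map (songNote notes) := by
  induction numbers generalizing ind result with
  | nil => simp [songLoop, List.scanl_nil]
  | cons el rest ih =>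
    simp only [songLoop, List.scanl_cons, List.tail_cons]
    rw [ih]
    cases rest with
    | nil => simp [List.scanl_nil]
    | cons a l => simp [List.scanl_cons]

-- B's slice pair is List.rotate
lemma songRot_eq_rotate (l : List String) (k : Int) (h0 : 0 ≤ k) (h1 : k ≤ (l.length : Int)) :
    songRot l k = l.rotate k.toNat := by
  unfold songRot
  rw [PySem.List.slice_from l h0, PySem.List.slice_to l h0,
      List.rotate_eq_drop_append_take (by omega)]

-- rotating notes.rotate (s mod n) further by (el mod n) lands on notes.rotate ((s+el) mod n)
lemma songRot_step (notes : List String) (s el : Int) (hne : notes ≠ []) :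
    songRot (notes.rotate (PySem.Int.mod s (notes.length : Int)).toNat)
        (PySem.Int.mod el (notes.length : Int))
      = notes.rotate (PySem.Int.mod (s + el) (notes.length : Int)).toNat := by
  have hn : 0 < (notes.length : Int) := by
    have := List.length_pos_iff.mpr hne; exact_mod_cast this
  have hms := PySem.Int.mod_nonneg s hn
  have hme := PySem.Int.mod_nonneg el hn
  have hlts := PySem.Int.mod_lt s hn
  have hlte := PySem.Int.mod_lt el hn
  rw [songRot_eq_rotate _ _ hme (by simp [List.length_rotate]; omega),
      List.rotate_rotate, ← List.rotate_mod]
  congr 1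
  simp only [PySem.Int.mod_eq_emod_of_pos hn] at hms hme hlts hlte ⊢
  have key : (((s % (notes.length : Int)).toNat + (el % (notes.length : Int)).toNat) % notes.length : Int)
      = ((s + el) % (notes.length : Int)).toNat := by
    rw [Int.toNat_of_nonneg hms, Int.toNat_of_nonneg hme,
        Int.toNat_of_nonneg (Int.emod_nonneg _ (by omega)), ← Int.add_emod]
  exact_mod_cast key

-- front of the rotated list = notes[s % n]
lemma songHead_rotate (notes : List String) (s : Int) (hne : notes ≠ []) :
    songHead (notes.rotate (PySem.Int.mod s (notes.length : Int)).toNat) = songNote notes s := by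
  have hpos : 0 < notes.length := List.length_pos_iff.mpr hne
  have hn : 0 < (notes.length : Int) := by exact_mod_cast hpos
  have hms : 0 ≤ s % (notes.length : Int) := Int.emod_nonneg _ (by omega)
  have hlts : s % (notes.length : Int) < (notes.length : Int) := Int.emod_lt_of_pos _ hn
  have hmlt : (s % (notes.length : Int)).toNat < notes.length := by omega
  simp [songHead, songNote, PySem.List.pyGet?, PySem.List.pyIdx?, hms, hlts, hpos, hmlt,
    List.getElem_rotate, Nat.mod_eq_of_lt]

-- B's loop invariant: starting from cur = notes.rotate (s mod n), the fold appends the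
-- notes of the successive prefix sums of s
lemma songAlt_loop (notes : List String) (numbers : List Int) (s : Int) (res : List String)
    (hne : notes ≠ []) :
    (numbers.foldl
        (fun (st : List String × List String) el =>
          let cur := songRot st.1 (PySem.Int.mod el (notes.length : Int))
          (cur, st.2 ++ [songHead cur]))
        (notes.rotate (PySem.Int.mod s (notes.length : Int)).toNat, res)).2
      = res ++ ((List.scanl (· + ·) s numbers).tail).map (songNote notes) := by
  induction numbers generalizing s res with
  | nil => simp [List.scanl_nil]
  | cons el rest ih =>
    simp only [List.foldl_cons, List.scanl_cons, List.tail_cons]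
    rw [songRot_step notes s el hne, songHead_rotate notes (s + el) hne, ih]
    cases rest with
    | nil => simp [List.scanl_nil]
    | cons a l => simp [List.scanl_cons]

-- ===== VERDICT (by name: the statement is the Claim_ definition above) =====
theorem song_spec : Claim_equal_song := by
  intro notes numbers start _ hne
  unfold Spec_song song song_alt
  have hn : 0 < (notes.length : Int) := by
    have := List.length_pos_iff.mpr hne; exact_mod_cast this
  rw [songLoop_eq]
  have hrot : songRot notes (PySem.Int.mod start (notes.length : Int))
      = notes.rotate (PySem.Int.mod start (notes.length : Int)).toNat :=
    songRot_eq_rotate notes _ (PySem.Int.mod_nonneg start hn)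
      (le_of_lt (PySem.Int.mod_lt start hn))
  simp only [hrot]
  rw [songAlt_loop notes numbers start _ hne, songHead_rotate notes start hne]
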